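-- pv_equiv track=rewrite | github.com/jpeddicord/jobservice | JobService/util.py | dbus_safe_name
-- ===== SOURCE A (Python) =====
-- def dbus_safe_name(unsafe):
--     """
--     Returns a name that is safe to export over DBus.
--     Based on the implementation in upstart/libnih.
--     """
--     safe = ''
--     for ch in unsafe:
--         if (ch >= 'a' and ch <= 'z') or (ch >= 'a' and ch <= 'z') or (ch >= '0' and ch <= '9'):
--             safe += ch
--         else:
--             safe += '_{0:02x}'.format(ord(ch))
--     return safe
-- ===== SOURCE B (Python) =====
-- def dbus_safe_name(unsafe):
--     """Escape into a DBus-safe name by building a translation table for the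
--     distinct unsafe characters and applying str.translate in one pass."""
--     table = {ord(ch): '_{0:02x}'.format(ord(ch))
--              for ch in set(unsafe)
--              if not ('a' <= ch <= 'z' or '0' <= ch <= '9')}
--     return unsafe.translate(table)
-- ===== Notes on version B (the rewrite author's own statement) =====
-- stated objective: faster
-- what changed: Instead of A's per-character loop with quadratic string concatenation, B builds a translation table (ord -> hex escape) from the distinct unsafe characters and applies str.translate once.
import Mathlib
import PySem

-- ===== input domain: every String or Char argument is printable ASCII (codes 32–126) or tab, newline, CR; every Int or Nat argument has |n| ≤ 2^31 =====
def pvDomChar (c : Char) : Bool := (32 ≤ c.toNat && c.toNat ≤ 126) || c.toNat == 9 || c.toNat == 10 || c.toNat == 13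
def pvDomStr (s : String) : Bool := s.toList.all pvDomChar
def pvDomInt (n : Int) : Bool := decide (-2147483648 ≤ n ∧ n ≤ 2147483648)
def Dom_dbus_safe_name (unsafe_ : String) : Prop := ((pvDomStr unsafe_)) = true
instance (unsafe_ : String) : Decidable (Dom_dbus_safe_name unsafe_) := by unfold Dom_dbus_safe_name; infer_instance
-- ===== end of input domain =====

-- B replaces A's explicit accumulator loop by a translation table built from the distinct
-- unsafe characters plus one str.translate pass; same return value, more idiomatic.

-- '_{0:02x}'.format(n) — exact for codepoints < 256 (Dom is printable ASCII)
def pvHexDigit (n : Nat) : Char := if n < 10 then Char.ofNat (48 + n) else Char.ofNat (87 + n)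
def pvHexEscape (n : Nat) : List Char := ['_', pvHexDigit (n / 16), pvHexDigit (n % 16)]

-- ===== PORT A =====
-- literal port of A's loop: start from '', append ch or its hex escape per character
def dbus_safe_name (s0 : String) : String :=
  String.ofList (s0.toList.foldl
    (fun safe ch =>
      if (('a' ≤ ch && ch ≤ 'z') || ('a' ≤ ch && ch ≤ 'z') || ('0' ≤ ch && ch ≤ '9')) then
        safe ++ [ch]
      else
        safe ++ pvHexEscape ch.toNat) [])

-- ===== PORT B =====
-- the dict comprehension of Source B: for each distinct unsafe character of the input,
-- map its codepoint to its hex escape (keys are distinct, so the fold only appends)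
def pvTable (cs : List Char) : PySem.Dict Int (List Char) :=
  ((PySem.Set.ofList cs).filter
      (fun ch => !(('a' ≤ ch && ch ≤ 'z') || ('0' ≤ ch && ch ≤ '9')))).foldl
    (fun d ch => d.insert (ch.toNat : Int) (pvHexEscape ch.toNat)) PySem.Dict.empty

-- str.translate(table): ported by hand (no PySem primitive) — exact: each character is
-- replaced by its table entry when its codepoint is a key, and kept otherwise.
def dbus_safe_name_alt (s0 : String) : String :=
  String.ofList ((s0.toList.map (fun ch =>
    match (pvTable s0.toList).get? (ch.toNat : Int) with
    | some r => r
    | none => [ch])).flatten)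

-- ===== PRECONDITION & SPEC =====
def Spec_dbus_safe_name (s0 : String) (out : String) : Prop := out = dbus_safe_name_alt s0
instance (s0 : String) (out : String) : Decidable (Spec_dbus_safe_name s0 out) := by unfold Spec_dbus_safe_name; infer_instance

-- ===== CLAIM (what is proved, stated in full; the proofs are below) =====
def Claim_equal_dbus_safe_name : Prop := ∀ (s0 : String), Dom_dbus_safe_name s0 → Spec_dbus_safe_name s0 (dbus_safe_name s0)

-- ===== LEMMAS AND PROOFS =====

-- the unsafe-character predicate shared by both programs
def pvUnsafe (ch : Char) : Bool := !(('a' ≤ ch && ch ≤ 'z') || ('0' ≤ ch && ch ≤ '9'))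

theorem pv_key_inj : Function.Injective (fun c : Char => (c.toNat : Int)) := by
  intro a b h
  simp only at h
  have h' : a.toNat = b.toNat := Int.natCast_inj.mp h
  exact Char.ext (UInt32.toNat_inj.mp h')

-- the table's lookup, characterised for characters of the input
theorem pv_table_get (cs : List Char) (ch : Char) (hmem : ch ∈ cs) :
    (pvTable cs).get? (ch.toNat : Int)
      = if pvUnsafe ch then some (pvHexEscape ch.toNat) else none := by
  set l := ((PySem.Set.ofList cs).filter
      (fun ch => !(('a' ≤ ch && ch ≤ 'z') || ('0' ≤ ch && ch ≤ '9')))) with hl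
  have hlnodup : l.Nodup := (PySem.Set.nodup_ofList cs).filter _
  have hmapnodup : (l.map (fun c : Char => (c.toNat : Int))).Nodup :=
    hlnodup.map (fun _ _ h => pv_key_inj h)
  have hitems : (pvTable cs).items
      = l.map (fun c => ((c.toNat : Int), pvHexEscape c.toNat)) := by
    unfold pvTable
    rw [← hl,
      PySem.Dict.items_foldl_insert_fresh l _ _ _ (by intro a _; rfl) hmapnodup]
    rfl
  have hkeys : (pvTable cs).keys = l.map (fun c : Char => (c.toNat : Int)) := by
    unfold PySem.Dict.keys
    rw [hitems, List.map_map]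
    rfl
  have hkeysnodup : (pvTable cs).keys.Nodup := by rw [hkeys]; exact hmapnodup
  by_cases hu : pvUnsafe ch = true
  · have hin : ch ∈ l := by
      rw [hl]
      exact List.mem_filter.2 ⟨(PySem.Set.mem_ofList _ _).2 hmem, hu⟩
    have hmemItems : ((ch.toNat : Int), pvHexEscape ch.toNat) ∈ (pvTable cs).items := by
      rw [hitems]
      exact List.mem_map.2 ⟨ch, hin, rfl⟩
    simp [hu, PySem.Dict.get?_of_mem_items _ hmemItems hkeysnodup]
  · have hnin : ch ∉ l := by
      rw [hl]; intro hc
      exact hu (List.mem_filter.1 hc).2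
    have hnk : (ch.toNat : Int) ∉ (pvTable cs).keys := by
      rw [hkeys]
      intro hc
      obtain ⟨c, hc1, hc2⟩ := List.mem_map.1 hc
      exact hnin (pv_key_inj hc2 ▸ hc1)
    simp [hu, (PySem.Dict.get?_eq_none_iff_not_mem_keys _ _).2 hnk]

-- A's branch body, with the append pulled out of the if
theorem pv_body_eq (ch : Char) (safe : List Char) :
    (if (('a' ≤ ch && ch ≤ 'z') || ('a' ≤ ch && ch ≤ 'z') || ('0' ≤ ch && ch ≤ '9')) then
        safe ++ [ch]
      else
        safe ++ pvHexEscape ch.toNat)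
    = safe ++ (if pvUnsafe ch then pvHexEscape ch.toNat else [ch]) := by
  unfold pvUnsafe
  by_cases h1 : ('a' ≤ ch && ch ≤ 'z') = true <;>
    by_cases h2 : ('0' ≤ ch && ch ≤ '9') = true <;> simp [h1, h2]

-- A's accumulator loop is the concatenation of per-character pieces
theorem pv_foldl_eq (l acc : List Char) :
    l.foldl (fun safe ch =>
      if (('a' ≤ ch && ch ≤ 'z') || ('a' ≤ ch && ch ≤ 'z') || ('0' ≤ ch && ch ≤ '9')) then
        safe ++ [ch]
      else
        safe ++ pvHexEscape ch.toNat) acc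
    = acc ++ l.flatMap (fun ch => if pvUnsafe ch then pvHexEscape ch.toNat else [ch]) := by
  induction l generalizing acc with
  | nil => simp
  | cons ch t ih =>
      rw [List.foldl_cons, pv_body_eq, ih, List.flatMap_cons, List.append_assoc]

-- ===== VERDICT (by name: the statement is the Claim_ definition above) =====
theorem dbus_safe_name_spec : Claim_equal_dbus_safe_name := by
  intro s0 _
  unfold Spec_dbus_safe_name dbus_safe_name dbus_safe_name_alt
  rw [pv_foldl_eq]
  congr 1
  rw [List.flatten_eq_flatMap, List.flatMap_map, List.nil_append]
  apply List.flatMap_congr  -- pointwise, for members of s0.toList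
  intro ch hch
  rw [pv_table_get s0.toList ch hch]
  by_cases hu : pvUnsafe ch = true <;> simp [hu]
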